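-- pv_equiv track=rewrite | github.com/i4104xNightOwl/IArDE | core/utils.py | is_window_floating
-- ===== SOURCE A (Python) =====
-- def is_window_floating(window_class: str, window_name: str) -> bool:
--     """Kiểm tra xem cửa sổ có nên floating không"""
--     floating_classes = [
--         'floating',
--         'dialog',
--         'popup',
--         'notification',
--         'splash',
--         'toolbar'
--     ]
--
--     floating_names = [
--         'dialog',
--         'popup',
--         'notification',
--         'splash',
--         'about',
--         'preferences',
--         'settings'
--     ]
--
--     # Kiểm tra class name
--     for floating_class in floating_classes:
--         if floating_class.lower() in window_class.lower():
--             return True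
--
--     # Kiểm tra window name
--     for floating_name in floating_names:
--         if floating_name.lower() in window_name.lower():
--             return True
--
--     return False
-- ===== SOURCE B (Python) =====
-- _FLOATING_CLASSES = (
--     'floating', 'dialog', 'popup', 'notification', 'splash', 'toolbar'
-- )
--
-- _FLOATING_NAMES = (
--     'dialog', 'popup', 'notification', 'splash', 'about', 'preferences', 'settings'
-- )
--
--
-- def _scan(text, keywords):
--     # single left-to-right position scan: at each position, test whether any
--     # keyword starts there (str.startswith accepts a tuple of prefixes)
--     for i in range(len(text) + 1):
--         if text.startswith(keywords, i):
--             return True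
--     return False
--
--
-- def is_window_floating(window_class: str, window_name: str) -> bool:
--     return (_scan(window_class.lower(), _FLOATING_CLASSES)
--             or _scan(window_name.lower(), _FLOATING_NAMES))
-- ===== Notes on version B (the rewrite author's own statement) =====
-- stated objective: alternative
-- what changed: Replaces A's two keyword-major loops (each doing a full substring search per keyword) by a position-major single scan of each lowered string, testing at every position whether any keyword starts there via a tuple-argument str.startswith.
import Mathlib
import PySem

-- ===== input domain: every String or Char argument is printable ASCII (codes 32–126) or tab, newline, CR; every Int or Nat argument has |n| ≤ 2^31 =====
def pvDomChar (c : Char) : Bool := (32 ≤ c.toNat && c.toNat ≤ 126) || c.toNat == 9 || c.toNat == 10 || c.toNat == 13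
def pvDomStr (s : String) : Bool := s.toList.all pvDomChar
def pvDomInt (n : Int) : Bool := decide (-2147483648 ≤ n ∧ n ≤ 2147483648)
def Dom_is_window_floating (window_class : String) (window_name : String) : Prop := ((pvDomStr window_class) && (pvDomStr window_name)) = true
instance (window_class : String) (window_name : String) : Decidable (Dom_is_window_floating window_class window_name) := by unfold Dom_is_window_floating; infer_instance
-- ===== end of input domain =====

-- B replaces A's two keyword-major substring-search loops by a position-major scan
-- (one pass over each lowered string, testing at every position whether some keyword
-- starts there); objective: alternative (same cost, different traversal).

-- ===== PORT A =====
def pvFloatingClasses : List String :=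
  ["floating", "dialog", "popup", "notification", "splash", "toolbar"]

def pvFloatingNames : List String :=
  ["dialog", "popup", "notification", "splash", "about", "preferences", "settings"]

-- 'for kw in kws: if kw.lower() in s.lower(): return True' (falls through to the caller's next statement)
def pvLoopA (kws : List String) (s : String) : Bool :=
  match kws with
  | [] => false
  | k :: rest =>
    if PySem.Str.isIn (PySem.Str.lower k) (PySem.Str.lower s) then true
    else pvLoopA rest s

def is_window_floating (window_class : String) (window_name : String) : Bool :=
  if pvLoopA pvFloatingClasses window_class then true
  else if pvLoopA pvFloatingNames window_name then true
  else false

-- ===== PORT B =====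
-- Source B's _scan: 'for i in range(len(text)+1): if text.startswith(keywords, i): return True';
-- ported as structural recursion over the successive suffixes text[i:]
def pvScan (kws : List (List Char)) : List Char → Bool
  | [] => kws.any (fun k => PySem.Chars.startswith [] k)
  | c :: rest =>
    if kws.any (fun k => PySem.Chars.startswith (c :: rest) k) then true
    else pvScan kws rest

def pvClassesB : List (List Char) :=
  ["floating".toList, "dialog".toList, "popup".toList, "notification".toList,
   "splash".toList, "toolbar".toList]

def pvNamesB : List (List Char) :=
  ["dialog".toList, "popup".toList, "notification".toList, "splash".toList,
   "about".toList, "preferences".toList, "settings".toList]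

def is_window_floating_alt (window_class : String) (window_name : String) : Bool :=
  pvScan pvClassesB (PySem.Chars.lower window_class.toList) ||
  pvScan pvNamesB (PySem.Chars.lower window_name.toList)

-- ===== PRECONDITION & SPEC =====
def Spec_is_window_floating (window_class : String) (window_name : String) (out : Bool) : Prop := out = is_window_floating_alt window_class window_name
instance (window_class : String) (window_name : String) (out : Bool) : Decidable (Spec_is_window_floating window_class window_name out) := by unfold Spec_is_window_floating; infer_instance

-- ===== CLAIM (what is proved, stated in full; the proofs are below) =====
def Claim_equal_is_window_floating : Prop := ∀ (window_class : String) (window_name : String), Dom_is_window_floating window_class window_name → Spec_is_window_floating window_class window_name (is_window_floating window_class window_name)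

-- ===== LEMMAS AND PROOFS =====

-- A's keyword loop is an 'any' over the keyword list
theorem pvLoopA_eq_any (kws : List String) (s : String) :
    pvLoopA kws s = true ↔
      ∃ k ∈ kws, PySem.Str.isIn (PySem.Str.lower k) (PySem.Str.lower s) = true := by
  induction kws with
  | nil => simp [pvLoopA]
  | cons k rest ih =>
    simp only [pvLoopA, List.mem_cons]
    split_ifs with h
    · exact iff_of_true rfl ⟨k, Or.inl rfl, h⟩
    · rw [ih]
      constructor
      · rintro ⟨a, ha, hh⟩; exact ⟨a, Or.inr ha, hh⟩
      · rintro ⟨a, ha | ha, hh⟩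
        · subst ha; exact absurd hh h
        · exact ⟨a, ha, hh⟩

-- B's position scan finds exactly the keywords that occur as an infix
theorem pvScan_iff (kws : List (List Char)) (t : List Char) :
    pvScan kws t = true ↔ ∃ k ∈ kws, k <:+: t := by
  induction t with
  | nil =>
    simp [pvScan, List.any_eq_true, PySem.Chars.startswith_iff]
  | cons c rest ih =>
    simp only [pvScan]
    split_ifs with h
    · simp only [List.any_eq_true, PySem.Chars.startswith_iff] at h
      obtain ⟨k, hk, hp⟩ := h
      exact iff_of_true rfl ⟨k, hk, hp.isInfix⟩
    · simp only [List.any_eq_true, PySem.Chars.startswith_iff] at h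
      push Not at h
      rw [ih]
      constructor
      · rintro ⟨k, hk, hi⟩; exact ⟨k, hk, List.infix_cons hi⟩
      · rintro ⟨k, hk, hi⟩
        rcases List.infix_cons_iff.mp hi with hp | hi'
        · exact absurd hp (h k hk)
        · exact ⟨k, hk, hi'⟩

-- lowercase keyword literals are fixed by lower
theorem pvLowerLit :
    PySem.Chars.lower "floating".toList = "floating".toList ∧
    PySem.Chars.lower "dialog".toList = "dialog".toList ∧
    PySem.Chars.lower "popup".toList = "popup".toList ∧
    PySem.Chars.lower "notification".toList = "notification".toList ∧
    PySem.Chars.lower "splash".toList = "splash".toList ∧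
    PySem.Chars.lower "toolbar".toList = "toolbar".toList ∧
    PySem.Chars.lower "about".toList = "about".toList ∧
    PySem.Chars.lower "preferences".toList = "preferences".toList ∧
    PySem.Chars.lower "settings".toList = "settings".toList := by decide

-- ===== VERDICT (by name: the statement is the Claim_ definition above) =====
theorem is_window_floating_spec : Claim_equal_is_window_floating := by
  intro wc wn _
  unfold Spec_is_window_floating
  rw [Bool.eq_iff_iff]
  have hA : is_window_floating wc wn = true ↔
      pvLoopA pvFloatingClasses wc = true ∨ pvLoopA pvFloatingNames wn = true := by
    unfold is_window_floating
    split_ifs <;> simp_all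
  obtain ⟨l1, l2, l3, l4, l5, l6, l7, l8, l9⟩ := pvLowerLit
  rw [hA, pvLoopA_eq_any, pvLoopA_eq_any]
  simp only [is_window_floating_alt, Bool.or_eq_true, pvScan_iff,
    PySem.Str.isIn_iff_infix, PySem.Str.toList_lower,
    pvFloatingClasses, pvFloatingNames, pvClassesB, pvNamesB,
    List.mem_cons, List.not_mem_nil, or_false, exists_eq_or_imp, exists_eq_left,
    l1, l2, l3, l4, l5, l6, l7, l8, l9]
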